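-- pv_equiv track=rewrite | github.com/sunny0910/Data-Structures-Algorithms | matrix/min_max_cost_path.py | get_max_path
-- ===== SOURCE A (Python) =====
-- def is_valid(a, i, j):
--     """
--     Function to check valid index in a matrix
--     :param a: List # Matrix
--     :param i: Int
--     :param j: Int
--     :return: Bool
--     """
--     if i < 0 or j < 0 or i > len(a)-1 or j > len(a[0])-1:
--         return False
--     return True
--
-- def get_max_path(a):
--     """
--     Function to get max path in a matrix from top to bottom.
--     :param a: List # Matrix
--     :return: Int # Max Path Sum
--     """
--     def recur(i, j, total):
--         """
--         Recursive function to calculate sum from every element in the top level and return the max path sum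
--         :param i: Int
--         :param j: Int
--         :param total: Int
--         :return: Int # Min Sum
--         """
--         if i == len(a)-1:
--             return total
--         sum1 = sum2 = sum3 = 0
--         if is_valid(a, i+1, j-1):
--             sum1 = recur(i+1, j-1, total + a[i+1][j-1])
--         if is_valid(a, i+1, j):
--             sum2 = recur(i+1, j, total + a[i+1][j])
--         if is_valid(a, i+1, j+1):
--             sum3 = recur(i+1, j+1, total + a[i+1][j+1])
--         return max(sum1, sum2, sum3)
--     max_sum = 0
--     for i in range(len(a[0])):
--         max_sum = max(max_sum, recur(0, i, a[0][i]))
--     return max_sum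
-- ===== SOURCE B (Python) =====
-- def get_max_path(a):
--     cols = len(a[0])
--     best = [a[-1][j] for j in range(cols)]
--     for row in reversed(a[:-1]):
--         best = [row[j] + max(best[max(j - 1, 0):j + 2]) for j in range(cols)]
--     return max([0] + best)
-- ===== Notes on version B (the rewrite author's own statement) =====
-- stated objective: faster
-- what changed: Replaced the exponential top-down recursion that re-explores every diagonal path from each top cell with a bottom-up dynamic program that keeps, per column, the best path sum starting at that cell, folding one row at a time.
import Mathlib
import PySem

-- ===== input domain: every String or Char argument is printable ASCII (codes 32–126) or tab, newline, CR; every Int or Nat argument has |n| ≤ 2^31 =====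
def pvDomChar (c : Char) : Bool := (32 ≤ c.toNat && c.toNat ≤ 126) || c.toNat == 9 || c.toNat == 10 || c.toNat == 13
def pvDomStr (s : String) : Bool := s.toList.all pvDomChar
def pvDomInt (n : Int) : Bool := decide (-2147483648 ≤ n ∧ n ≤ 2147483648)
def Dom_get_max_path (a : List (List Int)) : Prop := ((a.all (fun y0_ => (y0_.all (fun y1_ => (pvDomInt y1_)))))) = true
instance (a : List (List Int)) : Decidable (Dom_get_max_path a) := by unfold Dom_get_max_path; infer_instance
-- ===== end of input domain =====

-- B replaces A's exponential path recursion by a bottom-up row DP (same return value on Pre_).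

-- ===== PORT A =====
-- is_valid(a, i, j)
def is_valid (a : List (List Int)) (i j : Int) : Bool :=
  if i < 0 ∨ j < 0 ∨ i > (a.length : Int) - 1 ∨ j > ((PySem.List.pyGetD a 0 []).length : Int) - 1
  then false else true

-- a[i][j]; in get_max_path every access is guarded by is_valid (and Pre_), so the defaults are never used
def pyCell (a : List (List Int)) (i j : Int) : Int :=
  PySem.List.pyGetD (PySem.List.pyGetD a i []) j 0

-- recur(i, j, total); fuel only makes the recursion structural — get_max_path passes fuel = len(a),
-- which the proof shows is never exhausted before the `i == len(a)-1` base case fires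
def recurA (a : List (List Int)) : Nat → Int → Int → Int → Int
  | fuel, i, j, total =>
    if i = (a.length : Int) - 1 then total
    else
      match fuel with
      | 0 => total
      | f + 1 =>
        let s1 := if is_valid a (i+1) (j-1) then recurA a f (i+1) (j-1) (total + pyCell a (i+1) (j-1)) else 0
        let s2 := if is_valid a (i+1) j then recurA a f (i+1) j (total + pyCell a (i+1) j) else 0
        let s3 := if is_valid a (i+1) (j+1) then recurA a f (i+1) (j+1) (total + pyCell a (i+1) (j+1)) else 0
        max (max s1 s2) s3

def get_max_path (a : List (List Int)) : Int :=
  (PySem.List.pyRange 0 ((PySem.List.pyGetD a 0 []).length : Int) 1).foldl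
    (fun max_sum i => max max_sum (recurA a a.length 0 i (pyCell a 0 i))) 0

-- ===== PORT B =====
-- max(xs) for nonempty xs (Python max raises on []; the [] case is never reached in get_max_path_alt)
def py_listMax : List Int → Int
  | [] => 0
  | x :: xs => xs.foldl max x

-- [row[j] + max(best[max(j-1,0):j+2]) for j in range(cols)]; Nat subtraction j-1 IS Python's max(j-1,0),
-- and drop/take are exactly the clamped slice; row.getD j 0 is row[j], exact since j < cols ≤ len(row) on Pre_
def bRow (cols : Nat) (best row : List Int) : List Int :=
  (List.range cols).map (fun j => row.getD j 0 + py_listMax ((best.drop (j - 1)).take (j + 2 - (j - 1))))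

def get_max_path_alt (a : List (List Int)) : Int :=
  let cols := (a.headD []).length
  let best0 := (List.range cols).map (fun j => (a.getLastD []).getD j 0)
  let best := a.dropLast.reverse.foldl (bRow cols) best0
  best.foldl max 0

-- ===== PRECONDITION & SPEC =====
-- Pre_ excludes exactly the inputs where A raises IndexError: the empty matrix (a[0]) and matrices
-- with a row shorter than the first row (such a cell is reached by some diagonal path).
def Pre_get_max_path (a : List (List Int)) : Prop :=
  a ≠ [] ∧ ∀ row ∈ a, (a.headD []).length ≤ row.length
instance (a : List (List Int)) : Decidable (Pre_get_max_path a) := by unfold Pre_get_max_path; infer_instance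

def pvWitness_get_max_path : List (List Int) := [[1, -2], [3, 4]]

def Spec_get_max_path (a : List (List Int)) (out : Int) : Prop := out = get_max_path_alt a
instance (a : List (List Int)) (out : Int) : Decidable (Spec_get_max_path a out) := by unfold Spec_get_max_path; infer_instance

-- ===== CLAIM (what is proved, stated in full; the proofs are below) =====
def Claim_equal_get_max_path : Prop := ∀ (a : List (List Int)), Dom_get_max_path a → Pre_get_max_path a → Spec_get_max_path a (get_max_path a)

-- ===== LEMMAS AND PROOFS =====

-- the DP table B computes, read off recursively: (dpH cols l).getD j 0 = best diagonal path sum starting at row 0 of l, column j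
def dpH (cols : Nat) : List (List Int) → List Int
  | [] => []
  | row :: rest =>
    match rest with
    | [] => (List.range cols).map (fun j => row.getD j 0)
    | _ :: _ => bRow cols (dpH cols rest) row

theorem dpH_length (cols : Nat) (l : List (List Int)) (hl : l ≠ []) : (dpH cols l).length = cols := by
  cases l with
  | nil => exact absurd rfl hl
  | cons r rest => cases rest <;> simp [dpH, bRow]

theorem pyGetD_zero_headD (a : List (List Int)) : PySem.List.pyGetD a 0 [] = a.headD [] := by
  cases a <;> simp [PySem.List.pyGetD, PySem.List.pyGet?, PySem.List.pyIdx?]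

theorem pyCell_nat (a : List (List Int)) (i j : Nat) :
    pyCell a (i : Int) (j : Int) = (a.getD i []).getD j 0 := by
  simp [pyCell]

-- B's fold over the reversed rows builds exactly the dpH table
theorem foldB (cols : Nat) (l : List (List Int)) (hl : l ≠ []) :
    l.dropLast.reverse.foldl (bRow cols) ((List.range cols).map (fun j => (l.getLastD []).getD j 0)) = dpH cols l := by
  induction l with
  | nil => exact absurd rfl hl
  | cons r rest ih =>
    cases rest with
    | nil => simp [dpH]
    | cons s t =>
      have h1 : (r :: s :: t).dropLast = r :: (s :: t).dropLast := rfl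
      have h2 : (r :: s :: t).getLastD [] = (s :: t).getLastD [] := by
        simp [List.getLastD_eq_getLast?]
      rw [h1, List.reverse_cons, List.foldl_append, h2, ih (by simp)]
      simp [dpH]

theorem getD_bRow (cols : Nat) (best row : List Int) (j : Nat) (hj : j < cols) :
    (bRow cols best row).getD j 0
      = row.getD j 0 + py_listMax ((best.drop (j - 1)).take (j + 2 - (j - 1))) := by
  unfold bRow
  exact PySem.List.getD_map_range _ cols j 0 hj

-- the slice max in bRow is the max over the in-range neighbour columns {j-1, j, j+1}
theorem sliceMax (l : List Int) (cols : Nat) (hl : l.length = cols) (j : Nat) (hj : j < cols) :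
    py_listMax ((l.drop (j - 1)).take (j + 2 - (j - 1))) =
      if j = 0 then
        (if cols = 1 then l.getD 0 0 else max (l.getD 0 0) (l.getD 1 0))
      else if j + 1 = cols then max (l.getD (j - 1) 0) (l.getD j 0)
      else max (max (l.getD (j - 1) 0) (l.getD j 0)) (l.getD (j + 1) 0) := by
  by_cases hj0 : j = 0
  · subst hj0
    simp only [Nat.zero_sub, List.drop_zero]
    cases l with
    | nil => simp at hl; omega
    | cons x l' =>
      cases l' with
      | nil =>
        have h1 : cols = 1 := by simpa using hl.symm
        simp [h1, py_listMax]
      | cons y t =>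
        have h1 : cols ≠ 1 := by simp at hl; omega
        simp [h1, py_listMax]
  · have h3 : j + 2 - (j - 1) = 3 := by omega
    have hj1 : j - 1 + 1 = j := by omega
    have hjl : j < l.length := by omega
    have hjm : j - 1 < l.length := by omega
    rw [h3, List.getD_eq_getElem l 0 hjm, List.getD_eq_getElem l 0 hjl,
      List.drop_eq_getElem_cons hjm, hj1, List.drop_eq_getElem_cons hjl, if_neg hj0]
    by_cases htop : j + 1 = cols
    · have hnil : l.drop (j + 1) = [] := List.drop_eq_nil_of_le (by omega)
      rw [hnil, if_pos htop]
      simp only [List.take_succ_cons, List.take_nil, py_listMax, List.foldl_cons, List.foldl_nil]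
    · have hj2 : j + 1 < l.length := by omega
      rw [List.drop_eq_getElem_cons hj2, List.getD_eq_getElem l 0 hj2, if_neg htop]
      simp only [List.take_succ_cons, List.take_zero, py_listMax, List.foldl_cons, List.foldl_nil]

theorem is_valid_true (a : List (List Int)) (i j : Int)
    (h : 0 ≤ i ∧ 0 ≤ j ∧ i ≤ (a.length : Int) - 1 ∧ j ≤ ((a.headD []).length : Int) - 1) :
    is_valid a i j = true := by
  have hC : ¬ (i < 0 ∨ j < 0 ∨ i > (a.length : Int) - 1 ∨ j > ((a.headD []).length : Int) - 1) := by
    omega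
  unfold is_valid
  rw [pyGetD_zero_headD, if_neg hC]

theorem is_valid_false (a : List (List Int)) (i j : Int)
    (h : j < 0 ∨ ((a.headD []).length : Int) - 1 < j) :
    is_valid a i j = false := by
  have hC : i < 0 ∨ j < 0 ∨ i > (a.length : Int) - 1 ∨ j > ((a.headD []).length : Int) - 1 := by
    omega
  unfold is_valid
  rw [pyGetD_zero_headD, if_pos hC]

theorem recurA_last (a : List (List Int)) (fuel : Nat) (i j t : Int)
    (h : i = (a.length : Int) - 1) : recurA a fuel i j t = t := by
  rw [recurA.eq_def]
  simp [h]

theorem recurA_step (a : List (List Int)) (f : Nat) (i j t : Int)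
    (h : ¬ i = (a.length : Int) - 1) :
    recurA a (f + 1) i j t =
      max (max (if is_valid a (i+1) (j-1) then recurA a f (i+1) (j-1) (t + pyCell a (i+1) (j-1)) else 0)
               (if is_valid a (i+1) j then recurA a f (i+1) j (t + pyCell a (i+1) j) else 0))
          (if is_valid a (i+1) (j+1) then recurA a f (i+1) (j+1) (t + pyCell a (i+1) (j+1)) else 0) := by
  rw [recurA.eq_def]
  simp only [if_neg h]

theorem dpH_last (a : List (List Int)) (i j : Nat) (hi : i + 1 = a.length)
    (hj : j < (a.headD []).length) :
    (dpH (a.headD []).length (a.drop i)).getD j 0 = (a.getD i []).getD j 0 := by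
  have hi' : i < a.length := by omega
  rw [List.drop_eq_getElem_cons hi', show a.drop (i+1) = [] from List.drop_eq_nil_of_le (by omega)]
  simp only [dpH]
  rw [PySem.List.getD_map_range _ _ j 0 hj, List.getD_eq_getElem a [] hi']

-- A's recursion is sandwiched by the DP value: its total plus the best remaining path, clamped below by 0
theorem recur_bounds (a : List (List Int)) (_hne : a ≠ [])
    (_hrow : ∀ row ∈ a, (a.headD []).length ≤ row.length) :
    ∀ (fuel i j : Nat) (t : Int), i < a.length → a.length ≤ fuel + i + 1 → j < (a.headD []).length →
      t + (dpH (a.headD []).length (a.drop i)).getD j 0 - (a.getD i []).getD j 0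
          ≤ recurA a fuel (i : Int) (j : Int) t ∧
        recurA a fuel (i : Int) (j : Int) t
          ≤ max 0 (t + (dpH (a.headD []).length (a.drop i)).getD j 0 - (a.getD i []).getD j 0) := by
  intro fuel
  induction fuel with
  | zero =>
    intro i j t hi hfi hj
    rw [recurA_last a 0 _ _ t (by omega), dpH_last a i j (by omega) hj]
    exact ⟨by omega, by simp⟩
  | succ f ih =>
    intro i j t hi hfi hj
    by_cases hlast : (i : Int) = (a.length : Int) - 1
    · rw [recurA_last a (f+1) _ _ t hlast, dpH_last a i j (by omega) hj]
      exact ⟨by omega, by simp⟩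
    · have hi1 : i + 1 < a.length := by omega
      set cols := (a.headD []).length with hcols
      rw [recurA_step a f _ _ t hlast]
      have hd1 : a.drop (i+1) ≠ [] := by
        intro hnil
        have := congrArg List.length hnil
        simp at this
        omega
      have hbl : (dpH cols (a.drop (i+1))).length = cols := dpH_length _ _ hd1
      have hdrop : a.drop i = a[i] :: a.drop (i+1) := List.drop_eq_getElem_cons (by omega)
      obtain ⟨s, tl, hst⟩ := List.exists_cons_of_ne_nil hd1
      have hdpH : dpH cols (a.drop i) = bRow cols (dpH cols (a.drop (i+1))) a[i] := by
        rw [hdrop, hst]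
        simp only [dpH]
      have hgetD : (dpH cols (a.drop i)).getD j 0
          = (a.getD i []).getD j 0
            + py_listMax (((dpH cols (a.drop (i+1))).drop (j - 1)).take (j + 2 - (j - 1))) := by
        rw [hdpH, getD_bRow _ _ _ j hj, List.getD_eq_getElem a [] (by omega)]
      have hM := sliceMax (dpH cols (a.drop (i+1))) cols hbl j hj
      have hcell : ∀ (k : Nat), pyCell a ((i : Int) + 1) (k : Int) = (a.getD (i+1) []).getD k 0 := by
        intro k
        rw [show ((i : Int) + 1) = ((i + 1 : Nat) : Int) by push_cast; ring, pyCell_nat]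
      have hIH : ∀ (k : Nat), k < cols →
          t + (dpH cols (a.drop (i+1))).getD k 0
              ≤ recurA a f ((i : Int) + 1) (k : Int) (t + pyCell a ((i : Int) + 1) (k : Int)) ∧
            recurA a f ((i : Int) + 1) (k : Int) (t + pyCell a ((i : Int) + 1) (k : Int))
              ≤ max 0 (t + (dpH cols (a.drop (i+1))).getD k 0) := by
        intro k hk
        have h := ih (i+1) k (t + (a.getD (i+1) []).getD k 0) hi1 (by omega) hk
        rw [show ((i + 1 : Nat) : Int) = (i : Int) + 1 by push_cast; ring] at h
        rw [hcell k]
        constructor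
        · omega
        · have h2 := h.2
          have e : (t + (a.getD (i+1) []).getD k 0) + (dpH cols (a.drop (i+1))).getD k 0
              - (a.getD (i+1) []).getD k 0 = t + (dpH cols (a.drop (i+1))).getD k 0 := by ring
          rwa [e] at h2
      have hv2 : is_valid a ((i : Int) + 1) ((j : Int)) = true :=
        is_valid_true _ _ _ ⟨by omega, by omega, by omega, by omega⟩
      have hs2 := hIH j hj
      rw [hgetD, hM, if_pos hv2]
      by_cases hj0 : j = 0
      · have hv1 : is_valid a ((i : Int) + 1) ((j : Int) - 1) = false :=
          is_valid_false _ _ _ (Or.inl (by omega))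
        have hn1 : ¬ (is_valid a ((i : Int) + 1) ((j : Int) - 1) = true) := by simp [hv1]
        rw [if_neg hn1, if_pos hj0]
        by_cases hc1 : cols = 1
        · have hv3 : is_valid a ((i : Int) + 1) ((j : Int) + 1) = false :=
            is_valid_false _ _ _ (Or.inr (by omega))
          have hn3 : ¬ (is_valid a ((i : Int) + 1) ((j : Int) + 1) = true) := by simp [hv3]
          rw [if_neg hn3, if_pos hc1]
          have e0 : ((0 : Nat) : Int) = (j : Int) := by omega
          have hb0 := hIH 0 (by omega)
          rw [e0] at hb0
          have eg : (dpH cols (a.drop (i+1))).getD 0 0 = (dpH cols (a.drop (i+1))).getD j 0 := by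
            rw [hj0]
          rw [eg] at hb0 ⊢
          obtain ⟨hl2, hr2⟩ := hb0
          constructor
          · have := le_max_left (max (0 : Int) (recurA a f ((i : Int) + 1) (j : Int)
              (t + pyCell a ((i : Int) + 1) (j : Int)))) 0
            omega
          · simp only [max_def] at hr2 ⊢
            split_ifs at hr2 ⊢ <;> omega
        · have hv3 : is_valid a ((i : Int) + 1) ((j : Int) + 1) = true :=
            is_valid_true _ _ _ ⟨by omega, by omega, by omega, by omega⟩
          rw [if_pos hv3, if_neg hc1]
          have e3 : ((j + 1 : Nat) : Int) = (j : Int) + 1 := by push_cast; ring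
          have hs3 := hIH (j+1) (by omega)
          rw [e3] at hs3
          have eg0 : (dpH cols (a.drop (i+1))).getD 0 0 = (dpH cols (a.drop (i+1))).getD j 0 := by
            rw [hj0]
          have eg1 : (dpH cols (a.drop (i+1))).getD 1 0 = (dpH cols (a.drop (i+1))).getD (j+1) 0 := by
            rw [hj0]
          rw [eg0, eg1]
          obtain ⟨hl2, hr2⟩ := hs2
          obtain ⟨hl3, hr3⟩ := hs3
          simp only [max_def] at hr2 hr3 ⊢
          split_ifs at hr2 hr3 ⊢ <;> omega
      · have hv1 : is_valid a ((i : Int) + 1) ((j : Int) - 1) = true :=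
          is_valid_true _ _ _ ⟨by omega, by omega, by omega, by omega⟩
        rw [if_pos hv1, if_neg hj0]
        have e1 : ((j - 1 : Nat) : Int) = (j : Int) - 1 := by omega
        have hs1 := hIH (j-1) (by omega)
        rw [e1] at hs1
        obtain ⟨hl1, hr1⟩ := hs1
        obtain ⟨hl2, hr2⟩ := hs2
        by_cases htop : j + 1 = cols
        · have hv3 : is_valid a ((i : Int) + 1) ((j : Int) + 1) = false :=
            is_valid_false _ _ _ (Or.inr (by omega))
          have hn3 : ¬ (is_valid a ((i : Int) + 1) ((j : Int) + 1) = true) := by simp [hv3]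
          rw [if_neg hn3, if_pos htop]
          simp only [max_def] at hr1 hr2 ⊢
          split_ifs at hr1 hr2 ⊢ <;> omega
        · have hv3 : is_valid a ((i : Int) + 1) ((j : Int) + 1) = true :=
            is_valid_true _ _ _ ⟨by omega, by omega, by omega, by omega⟩
          rw [if_pos hv3, if_neg htop]
          have e3 : ((j + 1 : Nat) : Int) = (j : Int) + 1 := by push_cast; ring
          have hs3 := hIH (j+1) (by omega)
          rw [e3] at hs3
          obtain ⟨hl3, hr3⟩ := hs3
          simp only [max_def] at hr1 hr2 hr3 ⊢
          split_ifs at hr1 hr2 hr3 ⊢ <;> omega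

-- a fold of maxes never goes below its initial value
theorem fold_ge_init (f : Nat → Int) (l : List Nat) :
    ∀ m : Int, m ≤ l.foldl (fun acc k => max acc (f k)) m := by
  induction l with
  | nil => intro m; simp
  | cons x xs ih =>
    intro m
    exact le_trans (le_max_left m (f x)) (ih (max m (f x)))

-- two max-folds agree when the entries agree after clamping at the (nonnegative) accumulator
theorem maxfold_congr (f g : Nat → Int) :
    ∀ (n : Nat), (∀ k, k < n → max 0 (f k) = max 0 (g k)) →
      ∀ m : Int, 0 ≤ m →
        (List.range n).foldl (fun acc k => max acc (f k)) m
          = (List.range n).foldl (fun acc k => max acc (g k)) m := by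
  intro n
  induction n with
  | zero => intro _ m _; simp
  | succ n ih =>
    intro h m hm
    rw [List.range_succ, List.foldl_append, List.foldl_append]
    simp only [List.foldl_cons, List.foldl_nil]
    rw [ih (fun k hk => h k (by omega)) m hm]
    have hP : (0 : Int) ≤ (List.range n).foldl (fun acc k => max acc (g k)) m :=
      le_trans hm (fold_ge_init g (List.range n) m)
    set Q := (List.range n).foldl (fun acc k => max acc (g k)) m with hQ
    have hfg := h n (by omega)
    simp only [max_def] at hfg ⊢
    split_ifs at hfg ⊢ <;> omega

-- a plain max-fold over a list is the max-fold over its indices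
theorem foldl_max_as_range (l : List Int) :
    ∀ m : Int, l.foldl max m
      = (List.range l.length).foldl (fun acc k => max acc (l.getD k 0)) m := by
  induction l with
  | nil => intro m; simp
  | cons x xs ih =>
    intro m
    simp only [List.foldl_cons, List.length_cons, List.range_succ_eq_map, List.foldl_cons,
      List.foldl_map, List.getD_cons_zero, List.getD_cons_succ]
    exact ih (max m x)

-- ===== VERDICT (by name: the statement is the Claim_ definition above) =====
theorem get_max_path_spec : Claim_equal_get_max_path := by
  intro a _ hPre
  obtain ⟨hne, hrow⟩ := hPre
  unfold Spec_get_max_path get_max_path get_max_path_alt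
  dsimp only
  rw [foldB _ a hne]
  rw [pyGetD_zero_headD]
  set cols := (a.headD []).length with hcols
  rw [PySem.List.pyRange_one]
  simp only [sub_zero, Int.toNat_natCast, List.foldl_map, zero_add]
  rw [foldl_max_as_range (dpH cols a) 0, dpH_length cols a hne]
  apply maxfold_congr _ _ cols _ 0 le_rfl
  intro k hk
  have hcell0 : pyCell a (0 : Int) ((k : Nat) : Int) = (a.getD 0 []).getD k 0 := by
    have := pyCell_nat a 0 k
    simpa using this
  rw [hcell0]
  have hb := recur_bounds a hne hrow a.length 0 k ((a.getD 0 []).getD k 0) (by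
    cases a with
    | nil => exact absurd rfl hne
    | cons r t => simp) (by omega) hk
  simp only [Nat.cast_zero, List.drop_zero] at hb
  obtain ⟨hlo, hhi⟩ := hb
  have e : (a.getD 0 []).getD k 0 + (dpH cols a).getD k 0 - (a.getD 0 []).getD k 0
      = (dpH cols a).getD k 0 := by ring
  rw [e] at hlo hhi
  simp only [max_def] at hhi ⊢
  split_ifs at hhi ⊢ <;> omega
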